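-- pv_equiv track=rewrite | github.com/hedinbil/bi-sqlfluff-pyspark | src/sqlfluff_pyspark/ast_extract.py | replace_sql_in_source
-- ===== SOURCE A (Python) =====
-- from typing import List, Dict, Tuple, Optional, Union
--
-- def replace_sql_in_source(
--     source_code: str,
--     sql_replacements: List[Tuple[int, int, int, int, str]],
-- ) -> str:
--     """
--     Replace SQL strings in source code with reformatted versions using line/column positions.
--
--     Args:
--         source_code: Original Python source code
--         sql_replacements: List of (start_line, start_col, end_line, end_col, new_sql) tuples
--
--     Returns:
--         Modified source code with SQL strings replaced
--     """
--     # Sort replacements by line number (reverse order to maintain indices)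
--     sql_replacements.sort(key=lambda x: (x[0], x[1]), reverse=True)
--
--     lines = source_code.splitlines(keepends=True)
--     if not lines:
--         return source_code
--
--     # Ensure all lines end with newline for proper reconstruction
--     for i, line in enumerate(lines):
--         if not line.endswith(("\n", "\r\n", "\r")):
--             lines[i] = line + "\n"
--
--     for start_line, start_col, end_line, end_col, new_sql in sql_replacements:
--         if start_line == end_line:
--             # Single line replacement
--             line = lines[start_line]
--             # Handle case where line might not have newline
--             line_content = line.rstrip("\n\r")
--             newline = line[len(line_content) :]
--             lines[start_line] = (
--                 line_content[:start_col] + new_sql + line_content[end_col:] + newline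
--             )
--         else:
--             # Multi-line replacement
--             start_line_content = lines[start_line][:start_col]
--             end_line_content = lines[end_line][end_col:]
--             lines[start_line] = start_line_content + new_sql + end_line_content
--             # Remove lines in between and the end line (since its content is now in start_line)
--             for i in range(start_line + 1, end_line + 1):
--                 lines[i] = ""
--
--     return "".join(lines)
-- ===== SOURCE B (Python) =====
-- # B: flat-text reconstruction — precompute prefix-sum offsets of the normalized
-- # lines, convert each (line,col) span to an absolute char range, and rebuild the
-- # result in one left-to-right cursor pass over the joined text (no line-list
-- # mutation, no blanking loop).  Like A it sorts sql_replacements in place; the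
-- # equivalence is about the return value.
-- def replace_sql_in_source(source_code, sql_replacements):
--     sql_replacements.sort(key=lambda x: (x[0], x[1]), reverse=True)
--     raw = source_code.splitlines(keepends=True)
--     if not raw:
--         return source_code
--     norm = [ln if ln.endswith(("\n", "\r\n", "\r")) else ln + "\n" for ln in raw]
--     base = [0]
--     for ln in norm:
--         base.append(base[-1] + len(ln))
--     text = "".join(norm)
--     pieces = []
--     cursor = 0
--     for start_line, start_col, end_line, end_col, new_sql in reversed(sql_replacements):
--         pieces.append(text[cursor:base[start_line] + start_col])
--         pieces.append(new_sql)
--         cursor = base[end_line] + end_col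
--     pieces.append(text[cursor:])
--     return "".join(pieces)
-- ===== Notes on version B (the rewrite author's own statement) =====
-- stated objective: alternative
-- what changed: B precomputes prefix-sum offsets of the normalized lines, converts each (line,col) span into an absolute character range over the flattened text, and rebuilds the output in one left-to-right cursor pass (sort ascending, append text[cursor:start] + new_sql, advance cursor to end, append the tail), instead of A's in-place line-list mutation with two per-line splice shapes and a blanking loop; like A it sorts sql_replacements in place.
-- outside the precondition, e.g. on replace_sql_in_source('ab\n', [(0, 0, 0, 99, 'X')]): A returns 'X\n', B returns 'X'; on replace_sql_in_source('a\n', [(-1, 0, -1, 1, 'X')]): A returns 'X\n', B returns 'a\nX'; on replace_sql_in_source('abcdef\n', [(0, 0, 0, 4, 'X'), (0, 2, 0, 6, 'Y')]): A returns 'X\n', B returns 'XY\n'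
import Mathlib
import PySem

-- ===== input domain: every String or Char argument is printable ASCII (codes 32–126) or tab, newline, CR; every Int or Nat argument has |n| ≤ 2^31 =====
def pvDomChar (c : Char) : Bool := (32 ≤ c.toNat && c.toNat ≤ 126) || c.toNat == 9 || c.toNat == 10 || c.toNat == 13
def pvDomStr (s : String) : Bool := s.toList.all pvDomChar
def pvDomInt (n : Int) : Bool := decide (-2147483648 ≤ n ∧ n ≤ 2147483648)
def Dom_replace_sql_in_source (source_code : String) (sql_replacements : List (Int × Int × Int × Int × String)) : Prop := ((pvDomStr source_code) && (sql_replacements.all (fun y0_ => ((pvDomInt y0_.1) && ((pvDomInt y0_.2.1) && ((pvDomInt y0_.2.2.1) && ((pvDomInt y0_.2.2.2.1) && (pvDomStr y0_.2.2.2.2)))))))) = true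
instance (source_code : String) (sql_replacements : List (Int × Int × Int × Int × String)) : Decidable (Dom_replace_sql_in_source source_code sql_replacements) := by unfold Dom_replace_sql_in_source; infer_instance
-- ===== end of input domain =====

-- B rebuilds the result in one left-to-right cursor pass over the flat normalized text, after
-- converting each (line, col) span to an absolute character range via prefix-sum line offsets,
-- instead of A's in-place line-list mutation with per-line splicing and a blanking loop
-- (objective: alternative; no speed claim).  Like A, the Python B sorts sql_replacements in
-- place; the equivalence is about the return value.

-- ===== PORT A =====
-- shared hand ports of Python primitives:
-- str.splitlines(keepends=True): exact for the terminators '\n', '\r', '\r\n'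
-- (the only ones occurring in the Dom character set).
def pvSplitlinesKeep (cur : List Char) : List Char → List (List Char)
  | [] => if cur = [] then [] else [cur]
  | '\n' :: rest => (cur ++ ['\n']) :: pvSplitlinesKeep [] rest
  | '\r' :: '\n' :: rest => (cur ++ ['\r', '\n']) :: pvSplitlinesKeep [] rest
  | '\r' :: rest => (cur ++ ['\r']) :: pvSplitlinesKeep [] rest
  | c :: rest => pvSplitlinesKeep (cur ++ [c]) rest

-- line.endswith(("\n", "\r\n", "\r"))
def pvEndsNL (cs : List Char) : Bool :=
  PySem.Chars.endswith cs ['\n'] || PySem.Chars.endswith cs ['\r', '\n'] || PySem.Chars.endswith cs ['\r']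

-- str.rstrip("\n\r"): drop trailing '\n'/'\r' characters (hand port; exact).
def pvRstripNL (cs : List Char) : List Char :=
  (cs.reverse.dropWhile (fun c => c == '\n' || c == '\r')).reverse

-- body of A's replacement loop (one iteration, acting on the list of lines)
def pvStepA (lines : List (List Char)) (r : Int × Int × Int × Int × String) : List (List Char) :=
  if r.1 = r.2.2.1 then
    let line := PySem.List.pyGetD lines r.1 []
    let content := pvRstripNL line
    let nl := PySem.List.slice line (some (content.length : Int)) none
    PySem.List.pySetD lines r.1
      (PySem.List.slice content none (some r.2.1) ++ r.2.2.2.2.toList ++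
        PySem.List.slice content (some r.2.2.2.1) none ++ nl)
  else
    let startc := PySem.List.slice (PySem.List.pyGetD lines r.1 []) none (some r.2.1)
    let endc := PySem.List.slice (PySem.List.pyGetD lines r.2.2.1 []) (some r.2.2.2.1) none
    (PySem.List.pyRange (r.1 + 1) (r.2.2.1 + 1)).foldl (fun ls i => PySem.List.pySetD ls i [])
      (PySem.List.pySetD lines r.1 (startc ++ r.2.2.2.2.toList ++ endc))

def replace_sql_in_source (source_code : String) (sql_replacements : List (Int × Int × Int × Int × String)) : String :=
  let reps := PySem.List.sorted2 sql_replacements (fun x => x.1) (fun x => x.2.1) true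
  let lines0 := pvSplitlinesKeep [] source_code.toList
  if lines0 = [] then source_code
  else
    let lines1 := (PySem.List.enumerate lines0 0).foldl
      (fun ls p => if pvEndsNL p.2 then ls else PySem.List.pySetD ls p.1 (p.2 ++ ['\n'])) lines0
    String.ofList (PySem.Chars.join [] (reps.foldl pvStepA lines1))

-- ===== PORT B =====
-- ln if ln.endswith(("\n","\r\n","\r")) else ln + "\n"
def pvNorm (cs : List Char) : List Char := if pvEndsNL cs then cs else cs ++ ['\n']

def replace_sql_in_source_alt (source_code : String) (sql_replacements : List (Int × Int × Int × Int × String)) : String :=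
  let reps := PySem.List.sorted2 sql_replacements (fun x => x.1) (fun x => x.2.1) true
  let raw := pvSplitlinesKeep [] source_code.toList
  if raw = [] then source_code
  else
    let norm := raw.map pvNorm
    let base := norm.foldl (fun b ln => b ++ [PySem.List.pyGetD b (-1) 0 + (ln.length : Int)]) [(0 : Int)]
    let text := PySem.Chars.join [] norm
    let fin := reps.reverse.foldl
      (fun (st : List (List Char) × Int) r =>
        (st.1 ++ [PySem.List.slice text (some st.2) (some (PySem.List.pyGetD base r.1 0 + r.2.1))]
              ++ [r.2.2.2.2.toList],
         PySem.List.pyGetD base r.2.2.1 0 + r.2.2.2.1))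
      ([], (0 : Int))
    String.ofList (PySem.Chars.join [] (fin.1 ++ [PySem.List.slice text (some fin.2) none]))

-- ===== PRECONDITION & SPEC =====
-- the terminator-free lines of the source, as Python's source_code.splitlines() returns them
def pvContentLines (source_code : String) : List (List Char) :=
  PySem.Chars.splitlines source_code.toList

-- lexicographic (line, column) keys of a span's two endpoints
abbrev pvStartKey (r : Int × Int × Int × Int × String) : Int ×ₗ Int := toLex (r.1, r.2.1)
abbrev pvEndKey (r : Int × Int × Int × Int × String) : Int ×ₗ Int := toLex (r.2.2.1, r.2.2.2.1)

-- a well-formed span: line numbers inside [0, #lines), columns inside the line's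
-- terminator-free content, and the start endpoint not after the end endpoint
abbrev pvGood (lines : List (List Char)) (r : Int × Int × Int × Int × String) : Prop :=
  0 ≤ r.1 ∧ r.1 ≤ r.2.2.1 ∧ r.2.2.1 < (lines.length : Int) ∧
  0 ≤ r.2.1 ∧ r.2.1 ≤ ((lines.getD r.1.toNat []).length : Int) ∧
  0 ≤ r.2.2.2.1 ∧ r.2.2.2.1 ≤ ((lines.getD r.2.2.1.toNat []).length : Int) ∧
  (r.1 = r.2.2.1 → r.2.1 ≤ r.2.2.2.1)

-- Pre_ excludes, on a nonempty source, spans with out-of-range or negative line/column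
-- positions (there A raises IndexError or composes Python's negative-index/slice-clamping
-- accidents), overlapping spans (whose composition order is an accident of A's
-- right-to-left in-place editing), and two spans starting at the same position (a pure
-- sort tie whose insertion order is accidental).
def Pre_replace_sql_in_source (source_code : String) (sql_replacements : List (Int × Int × Int × Int × String)) : Prop :=
  source_code.toList = [] ∨
  ((∀ r ∈ sql_replacements, pvGood (pvContentLines source_code) r) ∧
   sql_replacements.Pairwise (fun a b =>
     (pvEndKey a ≤ pvStartKey b ∨ pvEndKey b ≤ pvStartKey a) ∧ pvStartKey a ≠ pvStartKey b))
instance (source_code : String) (sql_replacements : List (Int × Int × Int × Int × String)) : Decidable (Pre_replace_sql_in_source source_code sql_replacements) := by unfold Pre_replace_sql_in_source; infer_instance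

def pvWitness_replace_sql_in_source : String × (List (Int × Int × Int × Int × String)) :=
  ("a = 1\nq = \"SELECT\"\n", [(1, 4, 1, 12, "SELECT 1")])

def Spec_replace_sql_in_source (source_code : String) (sql_replacements : List (Int × Int × Int × Int × String)) (out : String) : Prop := out = replace_sql_in_source_alt source_code sql_replacements
instance (source_code : String) (sql_replacements : List (Int × Int × Int × Int × String)) (out : String) : Decidable (Spec_replace_sql_in_source source_code sql_replacements out) := by unfold Spec_replace_sql_in_source; infer_instance

-- ===== CLAIM (what is proved, stated in full; the proofs are below) =====
def Claim_equal_replace_sql_in_source : Prop := ∀ (source_code : String) (sql_replacements : List (Int × Int × Int × Int × String)), Dom_replace_sql_in_source source_code sql_replacements → Pre_replace_sql_in_source source_code sql_replacements → Spec_replace_sql_in_source source_code sql_replacements (replace_sql_in_source source_code sql_replacements)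

-- ===== LEMMAS AND PROOFS =====

-- characters that are not line terminators
def pvNoNL (p : List Char) : Prop := ∀ c ∈ p, (c == '\n' || c == '\r') = false

-- length of line j of the normalized source with its trailing '\n'/'\r' run removed
def pvClen (norm : List (List Char)) (j : Nat) : Nat := (pvRstripNL (norm.getD j [])).length

-- pvGood, restated against the normalized keepends lines (the form the invariant uses)
abbrev pvGoodN (norm : List (List Char)) (r : Int × Int × Int × Int × String) : Prop :=
  0 ≤ r.1 ∧ r.1 ≤ r.2.2.1 ∧ r.2.2.1 < (norm.length : Int) ∧
  0 ≤ r.2.1 ∧ r.2.1 ≤ (pvClen norm r.1.toNat : Int) ∧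
  0 ≤ r.2.2.2.1 ∧ r.2.2.2.1 ≤ (pvClen norm r.2.2.1.toNat : Int) ∧
  (r.1 = r.2.2.1 → r.2.1 ≤ r.2.2.2.1)

-- absolute offset of the start of line j in the flattened normalized source
def pvBaseN (norm : List (List Char)) (j : Nat) : Nat := (((norm.map List.length).take j)).sum

-- absolute offsets of a span's endpoints
def pvS (norm : List (List Char)) (r : Int × Int × Int × Int × String) : Nat :=
  pvBaseN norm r.1.toNat + r.2.1.toNat
def pvE (norm : List (List Char)) (r : Int × Int × Int × Int × String) : Nat :=
  pvBaseN norm r.2.2.1.toNat + r.2.2.2.1.toNat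

-- the spliced document from absolute position c on, for an ascending span list
def pvTail (norm : List (List Char)) (c : Nat) : List (Int × Int × Int × Int × String) → List Char
  | [] => norm.flatten.drop c
  | r :: rest =>
      (norm.flatten.take (pvS norm r)).drop c ++ r.2.2.2.2.toList ++ pvTail norm (pvE norm r) rest

-- A's replacement fold, processing an ascending list right-to-left
def pvAfter (norm : List (List Char)) (rs : List (Int × Int × Int × Int × String)) : List (List Char) :=
  rs.foldr (fun r ls => pvStepA ls r) norm

-- line/column of the first unprocessed span (sentinel: one past the last line)
def pvHeadL (norm : List (List Char)) (rs : List (Int × Int × Int × Int × String)) : Nat :=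
  match rs with | [] => norm.length | r :: _ => r.1.toNat
def pvHeadC (rs : List (Int × Int × Int × Int × String)) : Nat :=
  match rs with | [] => 0 | r :: _ => r.2.1.toNat
def pvTailPart (norm : List (List Char)) (rs : List (Int × Int × Int × Int × String)) : List Char :=
  match rs with | [] => [] | r :: rest => r.2.2.2.2.toList ++ pvTail norm (pvE norm r) rest

-- the invariant of A's right-to-left processing
def pvInv (norm : List (List Char)) (rs : List (Int × Int × Int × Int × String)) : Prop :=
  (pvAfter norm rs).length = norm.length ∧
  (∀ j : Nat, j < pvHeadL norm rs → (pvAfter norm rs)[j]? = norm[j]?) ∧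
  ∃ R, ((pvAfter norm rs)[pvHeadL norm rs]?).getD []
          = (norm.getD (pvHeadL norm rs) []).take (pvHeadC rs) ++ R ∧
       R ++ ((pvAfter norm rs).drop (pvHeadL norm rs + 1)).flatten = pvTailPart norm rs

theorem pv_norm_foldl (xs pre : List (List Char)) :
    (PySem.List.enumerate xs (pre.length : Int)).foldl
      (fun ls p => if pvEndsNL p.2 then ls else PySem.List.pySetD ls p.1 (p.2 ++ ['\n']))
      (pre ++ xs) = pre ++ xs.map pvNorm := by
  induction xs generalizing pre with
  | nil => simp [PySem.List.enumerate]
  | cons x xs ih =>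
    have hcons : PySem.List.enumerate (x :: xs) (pre.length : Int)
        = ((pre.length : Int), x) :: PySem.List.enumerate xs ((pre.length : Int) + 1) := by
      simp [PySem.List.enumerate]
    rw [hcons, List.foldl_cons]
    have hacc : (if pvEndsNL x then pre ++ x :: xs
        else PySem.List.pySetD (pre ++ x :: xs) (pre.length : Int) (x ++ ['\n']))
        = (pre ++ [pvNorm x]) ++ xs := by
      by_cases h : pvEndsNL x <;> simp [h, pvNorm, PySem.List.pySetD_natCast]
    have hlen : ((pre.length : Int) + 1) = (((pre ++ [pvNorm x]).length : Nat) : Int) := by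
      simp
    rw [hacc, hlen, ih (pre ++ [pvNorm x])]
    simp [pvNorm]

-- ---- rstrip facts ----
theorem pv_dropWhile_all_false {l : List Char} {f : Char → Bool} (h : ∀ c ∈ l, f c = false) :
    l.dropWhile f = l := by
  cases l with
  | nil => rfl
  | cons a t => rw [List.dropWhile_cons_of_neg (by simp [h a (List.mem_cons_self ..)])]

theorem pv_rstrip_decomp (cs : List Char) :
    cs = pvRstripNL cs ++ (cs.reverse.takeWhile (fun c => c == '\n' || c == '\r')).reverse := by
  calc cs = cs.reverse.reverse := by rw [List.reverse_reverse]
    _ = (cs.reverse.takeWhile (fun c => c == '\n' || c == '\r')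
          ++ cs.reverse.dropWhile (fun c => c == '\n' || c == '\r')).reverse := by
        rw [List.takeWhile_append_dropWhile]
    _ = pvRstripNL cs ++ (cs.reverse.takeWhile (fun c => c == '\n' || c == '\r')).reverse := by
        rw [List.reverse_append]; rfl

theorem pv_rstrip_append (p R : List Char) (hp : pvNoNL p) :
    pvRstripNL (p ++ R) = p ++ pvRstripNL R := by
  have hself : p.reverse.dropWhile (fun c => c == '\n' || c == '\r') = p.reverse :=
    pv_dropWhile_all_false (fun c hc => hp c (by simpa using hc))
  unfold pvRstripNL
  rw [List.reverse_append, List.dropWhile_append]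
  by_cases h : (R.reverse.dropWhile (fun c => c == '\n' || c == '\r')).isEmpty
  · have hR : R.reverse.dropWhile (fun c => c == '\n' || c == '\r') = [] := by
      simpa [List.isEmpty_iff] using h
    rw [if_pos h, hself, hR]
    simp
  · rw [if_neg h, List.reverse_append, List.reverse_reverse]

theorem pv_rstrip_self (p : List Char) (hp : pvNoNL p) : pvRstripNL p = p := by
  have := pv_rstrip_append p [] hp
  simpa [pvRstripNL] using this

theorem pv_rstrip_snoc_nl (xs : List Char) : pvRstripNL (xs ++ ['\n']) = pvRstripNL xs := by
  unfold pvRstripNL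
  rw [List.reverse_append, show (['\n'] : List Char).reverse = ['\n'] from rfl,
    List.singleton_append, List.dropWhile_cons_of_pos (by decide)]

theorem pv_rstrip_length_le (cs : List Char) : (pvRstripNL cs).length ≤ cs.length := by
  have h := congrArg List.length (pv_rstrip_decomp cs)
  simp only [List.length_append] at h
  omega

theorem pv_rstrip_prefix_take (cs : List Char) (k : Nat) (hk : k ≤ (pvRstripNL cs).length) :
    cs.take k = (pvRstripNL cs).take k := by
  conv_lhs => rw [pv_rstrip_decomp cs]
  exact List.take_append_of_le_length hk

-- the rstrip / re-append-terminator dance of A's single-line branch is a plain splice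
theorem pv_rstrip_splice (line s : List Char) (a b : Nat) (hab : a ≤ b)
    (hb : b ≤ (pvRstripNL line).length) :
    (pvRstripNL line).take a ++ s ++ (pvRstripNL line).drop b ++ line.drop (pvRstripNL line).length
      = line.take a ++ s ++ line.drop b := by
  obtain ⟨t, hd⟩ : ∃ t, line = pvRstripNL line ++ t := ⟨_, pv_rstrip_decomp line⟩
  set m := pvRstripNL line with hm
  rw [hd, List.drop_left, List.take_append_of_le_length (le_trans hab hb),
    List.drop_append_of_le_length hb]
  simp [List.append_assoc]

-- every line produced by splitlines has terminator-free rstrip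
theorem pv_slk_lines_ok (cur cs : List Char) :
    pvNoNL cur → ∀ line ∈ pvSplitlinesKeep cur cs, pvNoNL (pvRstripNL line) := by
  fun_induction pvSplitlinesKeep cur cs with
  | case1 => intro _ line hline; simp at hline
  | case2 cur h =>
    intro hcur line hline
    have : line = cur := by simpa using hline
    rw [this, pv_rstrip_self cur hcur]; exact hcur
  | case3 cur rest ih =>
    intro hcur line hline
    rcases (by simpa using hline : line = cur ++ ['\n'] ∨ line ∈ pvSplitlinesKeep [] rest) with h | h
    · rw [h, pv_rstrip_append cur ['\n'] hcur, show pvRstripNL ['\n'] = [] from rfl,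
        List.append_nil]
      exact hcur
    · exact ih (by intro c hc; simp at hc) line h
  | case4 cur rest ih =>
    intro hcur line hline
    rcases (by simpa using hline : line = cur ++ ['\r', '\n'] ∨ line ∈ pvSplitlinesKeep [] rest) with h | h
    · rw [h, pv_rstrip_append cur ['\r', '\n'] hcur, show pvRstripNL ['\r', '\n'] = [] from rfl,
        List.append_nil]
      exact hcur
    · exact ih (by intro c hc; simp at hc) line h
  | case5 cur rest h ih =>
    intro hcur line hline
    rcases (by simpa using hline : line = cur ++ ['\r'] ∨ line ∈ pvSplitlinesKeep [] rest) with h' | h'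
    · rw [h', pv_rstrip_append cur ['\r'] hcur, show pvRstripNL ['\r'] = [] from rfl,
        List.append_nil]
      exact hcur
    · exact ih (by intro c hc; simp at hc) line h'
  | case6 cur c rest h1 h2 h3 ih =>
    intro hcur line hline
    refine ih ?_ line hline
    intro d hd
    rcases (by simpa using hd : d ∈ cur ∨ d = c) with h' | h'
    · exact hcur d h'
    · subst h'
      have hc1 : d ≠ '\n' := fun hh => h1 (by rw [hh])
      have hc2 : d ≠ '\r' := fun hh => h3 (by rw [hh])
      simp [hc1, hc2]

theorem pv_norm_ok (line : List Char) (h : pvNoNL (pvRstripNL line)) :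
    pvNoNL (pvRstripNL (pvNorm line)) := by
  unfold pvNorm
  by_cases he : pvEndsNL line
  · simpa [he] using h
  · simpa [he, pv_rstrip_snoc_nl] using h

-- ---- flatten / offset arithmetic ----
theorem pv_flatten_drop (norm : List (List Char)) (j : Nat) :
    (norm.drop j).flatten = norm.flatten.drop (pvBaseN norm j) := by
  induction norm generalizing j with
  | nil => simp [pvBaseN]
  | cons x xs ih =>
    cases j with
    | zero => simp [pvBaseN]
    | succ k =>
      have hb : pvBaseN (x :: xs) (k + 1) = x.length + pvBaseN xs k := by
        simp [pvBaseN, List.take_succ_cons]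
      simp only [List.drop_succ_cons, List.flatten_cons, hb, ih k,
        List.drop_length_add_append]

theorem pv_baseN_succ (norm : List (List Char)) (j : Nat) (hj : j < norm.length) :
    pvBaseN norm (j + 1) = pvBaseN norm j + (norm.getD j []).length := by
  unfold pvBaseN
  rw [List.take_add_one, List.sum_append]
  rw [List.getElem?_map, List.getElem?_eq_getElem hj, List.getD_eq_getElem _ _ hj]
  simp

theorem pv_seg (norm : List (List Char)) (j a : Nat) (hj : j < norm.length)
    (ha : a ≤ (norm.getD j []).length) :
    norm.flatten.take (pvBaseN norm j + a) = (norm.take j).flatten ++ (norm.getD j []).take a := by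
  have hsplit : norm.flatten
      = (norm.take j).flatten ++ ((norm.getD j []) ++ (norm.drop (j + 1)).flatten) := by
    conv_lhs => rw [← List.take_append_drop j norm]
    rw [List.flatten_append, List.drop_eq_getElem_cons hj, List.flatten_cons,
      List.getD_eq_getElem _ _ hj]
  rw [hsplit,
    show pvBaseN norm j = (norm.take j).flatten.length by
      simp [pvBaseN, List.length_flatten, List.map_take],
    List.take_length_add_append, List.take_append_of_le_length ha]

-- ---- the blanking loop ----
theorem pv_setlist_length (idxs : List Int) (ls : List (List Char)) :
    (idxs.foldl (fun ls i => PySem.List.pySetD ls i []) ls).length = ls.length := by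
  induction idxs generalizing ls with
  | nil => rfl
  | cons i idxs ih => simp only [List.foldl_cons, ih, PySem.List.length_pySetD]

theorem pv_setlist_getElem (idxs : List Int) (h : ∀ i ∈ idxs, 0 ≤ i) (ls : List (List Char))
    (j : Nat) :
    (idxs.foldl (fun ls i => PySem.List.pySetD ls i []) ls)[j]?
      = if (j : Int) ∈ idxs ∧ j < ls.length then some [] else ls[j]? := by
  induction idxs generalizing ls with
  | nil => simp
  | cons i idxs ih =>
    have hi : 0 ≤ i := h i (List.mem_cons_self ..)
    simp only [List.foldl_cons]
    rw [ih (fun k hk => h k (List.mem_cons_of_mem _ hk)) (PySem.List.pySetD ls i []),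
      PySem.List.length_pySetD, PySem.List.pySetD_of_nonneg _ _ hi, List.getElem?_set]
    by_cases hm : (j : Int) ∈ idxs
    · by_cases hl : j < ls.length
      · simp [hm, hl]
      · have hnone : ls[j]? = none := List.getElem?_eq_none (by omega)
        simp [hm, hl]
        omega
    · by_cases hij : (j : Int) = i
      · have hij' : i.toNat = j := by omega
        by_cases hl : j < ls.length
        · simp [hij, hij', hl]
        · have hnone : ls[j]? = none := List.getElem?_eq_none (by omega)
          simp [hij, hij', hl]
      · have hij' : ¬ (i.toNat = j) := by omega
        simp [hm, hij, hij']

-- ---- one step of A, in uniform splice form ----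
theorem pv_stepA_char (lines : List (List Char)) (r : Int × Int × Int × Int × String)
    (hsl : 0 ≤ r.1) (hse : r.1 ≤ r.2.2.1) (hel : r.2.2.1 < (lines.length : Int))
    (hsc : 0 ≤ r.2.1) (hec : 0 ≤ r.2.2.2.1)
    (hsingle : r.1 = r.2.2.1 → r.2.1.toNat ≤ r.2.2.2.1.toNat ∧
        r.2.2.2.1.toNat ≤ (pvRstripNL (lines.getD r.1.toNat [])).length) :
    pvStepA lines r
      = (PySem.List.pyRange (r.1 + 1) (r.2.2.1 + 1)).foldl
          (fun ls i => PySem.List.pySetD ls i [])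
          (lines.set r.1.toNat
            ((lines.getD r.1.toNat []).take r.2.1.toNat ++ r.2.2.2.2.toList ++
             (lines.getD r.2.2.1.toNat []).drop r.2.2.2.1.toNat)) := by
  have hget1 : PySem.List.pyGetD lines r.1 [] = lines.getD r.1.toNat [] := by
    rw [PySem.List.pyGetD_eq_getElem lines [] hsl (by omega),
      List.getD_eq_getElem _ _ (by omega)]
  have hget2 : PySem.List.pyGetD lines r.2.2.1 [] = lines.getD r.2.2.1.toNat [] := by
    rw [PySem.List.pyGetD_eq_getElem lines [] (by omega) hel,
      List.getD_eq_getElem _ _ (by omega)]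
  unfold pvStepA
  by_cases h : r.1 = r.2.2.1
  · obtain ⟨h1, h2⟩ := hsingle h
    rw [if_pos h]
    have hrange : PySem.List.pyRange (r.1 + 1) (r.2.2.1 + 1) = [] :=
      PySem.List.pyRange_one_eq_nil (by omega)
    simp only [hrange, List.foldl_nil, hget1,
      PySem.List.slice_to _ hsc, PySem.List.slice_from _ hec,
      PySem.List.slice_from_natCast, PySem.List.pySetD_of_nonneg _ _ hsl]
    have h12 : r.1.toNat = r.2.2.1.toNat := by omega
    rw [← h12] at *
    rw [pv_rstrip_splice (lines.getD r.1.toNat []) r.2.2.2.2.toList r.2.1.toNat r.2.2.2.1.toNat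
      h1 h2]
  · rw [if_neg h]
    simp only [hget1, hget2, PySem.List.slice_to _ hsc, PySem.List.slice_from _ hec,
      PySem.List.pySetD_of_nonneg _ _ hsl]

theorem pv_flatten_replicate_nil (m : Nat) :
    (List.replicate m ([] : List Char)).flatten = [] := by
  induction m with
  | zero => rfl
  | succ k ih => simp [List.replicate_succ, ih]

-- ---- the main invariant ----
theorem pv_inv (norm : List (List Char)) (hok : ∀ l ∈ norm, pvNoNL (pvRstripNL l))
    (rs : List (Int × Int × Int × Int × String)) (hgood : ∀ r ∈ rs, pvGoodN norm r)
    (hpair : rs.Pairwise (fun a b => pvEndKey a ≤ pvStartKey b)) : pvInv norm rs := by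
  induction rs with
  | nil =>
    refine ⟨rfl, fun j hj => rfl, [], ?_, ?_⟩
    · show (norm[norm.length]?).getD [] = _
      rw [List.getElem?_eq_none (le_refl _)]
      simp [pvHeadC]
    · show ([] : List Char) ++ (norm.drop (norm.length + 1)).flatten = pvTailPart norm []
      have hd : norm.drop (norm.length + 1) = [] := List.drop_eq_nil_of_le (by omega)
      simp [pvTailPart, hd]
  | cons r rest ih =>
    obtain ⟨hOlen, hOpt, R', hOline, hOflat⟩ :=
      ih (fun x hx => hgood x (List.mem_cons_of_mem _ hx)) (List.pairwise_cons.mp hpair).2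
    set old := pvAfter norm rest with hold
    set n := norm.length with hn
    obtain ⟨g1, g2, g3, g4, g5, g6, g7, g8⟩ := hgood r (List.mem_cons_self ..)
    set slN := r.1.toNat with hslN
    set scN := r.2.1.toNat with hscN
    set elN := r.2.2.1.toNat with helN
    set ecN := r.2.2.2.1.toNat with hecN
    set H := pvHeadL norm rest with hH
    set C := pvHeadC rest with hC
    -- order facts from the pairwise hypothesis
    have hHfacts : elN ≤ H ∧ (elN = H → ecN ≤ C) ∧ (rest ≠ [] → H < n ∧ C ≤ pvClen norm H) := by
      rw [hH, hC]
      cases rest with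
      | nil =>
        simp only [pvHeadL, pvHeadC]
        refine ⟨by omega, by omega, by simp⟩
      | cons r' rest' =>
        obtain ⟨g1', g2', g3', g4', g5', _⟩ := hgood r' (List.mem_cons_of_mem _ (List.mem_cons_self ..))
        have hle : pvEndKey r ≤ pvStartKey r' := (List.pairwise_cons.mp hpair).1 r' (List.mem_cons_self ..)
        rw [Prod.Lex.le_iff] at hle
        simp only [pvEndKey, pvStartKey, ofLex_toLex] at hle
        simp only [pvHeadL, pvHeadC]
        have hkey : elN < r'.1.toNat ∨ (elN = r'.1.toNat ∧ ecN ≤ r'.2.1.toNat) := by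
          rcases hle with h | ⟨h1, h2⟩
          · left; omega
          · right; omega
        refine ⟨by omega, by omega, fun _ => ⟨by omega, by omega⟩⟩
    obtain ⟨hElH, hEcC, hRest⟩ := hHfacts
    have hslH : slN ≤ H := by omega
    have hslel : slN ≤ elN := by omega
    have heln : elN < n := by omega
    have hscec : r.1 = r.2.2.1 → scN ≤ ecN := fun h => by have := g8 h; omega
    have hclen_sl : scN ≤ pvClen norm slN := by omega
    have hclen_el : ecN ≤ pvClen norm elN := by omega
    -- reading lines of the processed-suffix document
    have hOldLt : ∀ j : Nat, j < H → old.getD j [] = norm.getD j [] := by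
      intro j hj
      rw [List.getD_eq_getElem?_getD, List.getD_eq_getElem?_getD, hOpt j hj]
    have hOldH : old.getD H [] = (norm.getD H []).take C ++ R' := by
      rw [List.getD_eq_getElem?_getD]
      exact hOline
    -- the prefix kept on line H is terminator-free
    have hpOK : rest ≠ [] → pvNoNL ((norm.getD H []).take C) := by
      intro hne
      have hCle : C ≤ (pvRstripNL (norm.getD H [])).length := (hRest hne).2
      rw [pv_rstrip_prefix_take _ _ hCle]
      intro c hc
      have hHn : H < n := (hRest hne).1
      have hmem : norm.getD H [] ∈ norm := by
        rw [List.getD_eq_getElem _ _ hHn]; exact List.getElem_mem _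
      exact hok _ hmem c (List.mem_of_mem_take hc)
    -- rstrip length of the current content of the start line
    have hsingle : r.1 = r.2.2.1 → scN ≤ ecN ∧ ecN ≤ (pvRstripNL (old.getD slN [])).length := by
      intro h
      refine ⟨hscec h, ?_⟩
      have hseq : slN = elN := by omega
      by_cases hcase : slN < H
      · rw [hOldLt slN hcase]
        calc ecN ≤ pvClen norm elN := hclen_el
          _ = (pvRstripNL (norm.getD slN [])).length := by rw [hseq]; rfl
      · have hslHeq : slN = H := by omega
        have hne : rest ≠ [] := by
          intro hemp
          rw [hemp] at hH
          simp only [pvHeadL, ← hn] at hH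
          omega
        have hCC : C ≤ pvClen norm H := (hRest hne).2
        have hlenp : ((norm.getD H []).take C).length = C := by
          rw [List.length_take]
          have := pv_rstrip_length_le (norm.getD H [])
          have : C ≤ (norm.getD H []).length := by
            have h2 := (hRest hne).2
            unfold pvClen at h2
            omega
          omega
        rw [hslHeq, hOldH, pv_rstrip_append _ _ (hpOK hne), List.length_append, hlenp]
        have : ecN ≤ C := hEcC (by omega)
        omega
    -- one step of A in splice form
    have hstep : pvAfter norm (r :: rest)
        = (PySem.List.pyRange (r.1 + 1) (r.2.2.1 + 1)).foldl
            (fun ls i => PySem.List.pySetD ls i [])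
            (old.set slN
              ((old.getD slN []).take scN ++ r.2.2.2.2.toList ++
               (old.getD elN []).drop ecN)) := by
      show pvStepA old r = _
      exact pv_stepA_char old r g1 g2 (by rw [hOlen, hn]; exact g3) g4 g6 hsingle
    set newline := (old.getD slN []).take scN ++ r.2.2.2.2.toList ++ (old.getD elN []).drop ecN
      with hnewline
    have hrangePos : ∀ i ∈ PySem.List.pyRange (r.1 + 1) (r.2.2.1 + 1), 0 ≤ i := by
      intro i hi
      rw [PySem.List.mem_pyRange_one] at hi
      omega
    have hsetlen : (old.set slN newline).length = n := by rw [List.length_set, hOlen]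
    have hnew_getElem : ∀ j : Nat,
        (pvAfter norm (r :: rest))[j]?
          = if slN + 1 ≤ j ∧ j ≤ elN ∧ j < n then some []
            else if j = slN then some newline else old[j]? := by
      intro j
      rw [hstep, pv_setlist_getElem _ hrangePos _ j, hsetlen]
      by_cases hmem : slN + 1 ≤ j ∧ j ≤ elN ∧ j < n
      · have : (j : Int) ∈ PySem.List.pyRange (r.1 + 1) (r.2.2.1 + 1) := by
          rw [PySem.List.mem_pyRange_one]; omega
        simp [this, hmem.2.2, hmem]
      · have hnotin : ¬ ((j : Int) ∈ PySem.List.pyRange (r.1 + 1) (r.2.2.1 + 1) ∧ j < n) := by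
          rw [PySem.List.mem_pyRange_one]
          intro ⟨⟨ha, hb⟩, hcc⟩
          exact hmem ⟨by omega, by omega, hcc⟩
        rw [if_neg hnotin, if_neg hmem]
        by_cases hj : j = slN
        · rw [if_pos hj, hj, List.getElem?_set_self (by omega)]
        · rw [if_neg hj, List.getElem?_set_ne (by omega)]
    have hlen' : (pvAfter norm (r :: rest)).length = n := by
      rw [hstep, pv_setlist_length, hsetlen]
    refine ⟨by rw [hlen', hn], ?_, r.2.2.2.2.toList ++ (old.getD elN []).drop ecN, ?_, ?_⟩
    · -- lines before the start line are untouched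
      intro j hj
      have hj' : j < slN := hj
      rw [hnew_getElem j, if_neg (by omega), if_neg (by omega)]
      exact hOpt j (by omega)
    · -- the start line now carries the original prefix plus the spliced tail
      show ((pvAfter norm (r :: rest))[slN]?).getD [] = (norm.getD slN []).take scN ++ _
      rw [hnew_getElem slN, if_neg (by omega), if_pos rfl]
      show newline = _
      rw [hnewline]
      have hpre : (old.getD slN []).take scN = (norm.getD slN []).take scN := by
        by_cases hcase : slN < H
        · rw [hOldLt slN hcase]
        · have hslHeq : slN = H := by omega
          have hne : rest ≠ [] := by
            intro hemp
            rw [hemp] at hH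
            simp only [pvHeadL, ← hn] at hH
            omega
          have hseq : elN = H := by omega
          have hscC : scN ≤ C := by
            have := hEcC hseq
            have := hscec (by omega)
            omega
          have hlenp : ((norm.getD H []).take C).length = C := by
            rw [List.length_take]
            have h2 := (hRest hne).2
            unfold pvClen at h2
            have := pv_rstrip_length_le (norm.getD H [])
            omega
          rw [hslHeq, hOldH, List.take_append_of_le_length (by omega), List.take_take,
            Nat.min_eq_left hscC]
      rw [hpre, List.append_assoc]
    · -- the tail from the start line onward is the splice of the remaining spans
      show (r.2.2.2.2.toList ++ (old.getD elN []).drop ecN)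
            ++ ((pvAfter norm (r :: rest)).drop (slN + 1)).flatten = pvTailPart norm (r :: rest)
      have hdrop : (pvAfter norm (r :: rest)).drop (slN + 1)
          = List.replicate (elN - slN) [] ++ old.drop (elN + 1) := by
        apply List.ext_getElem?
        intro k
        rw [List.getElem?_drop, hnew_getElem (slN + 1 + k)]
        by_cases hk : k < elN - slN
        · rw [if_pos (by omega)]
          rw [List.getElem?_append_left (by simp; omega), List.getElem?_replicate, if_pos hk]
        · rw [if_neg (by omega), if_neg (by omega)]
          rw [List.getElem?_append_right (by simp; omega), List.getElem?_drop]
          congr 1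
          simp [List.length_replicate]
          omega
      rw [hdrop, List.flatten_append, pv_flatten_replicate_nil, List.nil_append]
      show r.2.2.2.2.toList ++ (old.getD elN []).drop ecN ++ (old.drop (elN + 1)).flatten
          = r.2.2.2.2.toList ++ pvTail norm (pvE norm r) rest
      rw [List.append_assoc]
      congr 1
      have hEval : pvE norm r = pvBaseN norm elN + ecN := rfl
      -- length of the flattened prefix of j lines
      have hflt : ∀ j : Nat, (norm.take j).flatten.length = pvBaseN norm j := by
        intro j
        simp [pvBaseN, List.length_flatten, List.map_take]
      cases rest with
      | nil =>
        -- the processed-suffix document is the original document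
        have hOldEq : old = norm := by
          apply List.ext_getElem?
          intro k
          by_cases hk : k < n
          · exact hOpt k (by simpa [pvHeadL, ← hn] using hk)
          · rw [List.getElem?_eq_none (by omega), List.getElem?_eq_none (by omega)]
        rw [hOldEq]
        show (norm.getD elN []).drop ecN ++ (norm.drop (elN + 1)).flatten
            = pvTail norm (pvE norm r) []
        rw [pv_flatten_drop norm (elN + 1)]
        show _ = norm.flatten.drop (pvE norm r)
        rw [hEval, pv_baseN_succ norm elN heln]
        have hdecomp2 : norm.flatten.drop (pvBaseN norm elN)
            = norm.getD elN [] ++ norm.flatten.drop (pvBaseN norm elN + (norm.getD elN []).length) := by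
          rw [← pv_flatten_drop norm elN, List.drop_eq_getElem_cons (by omega),
            ← List.getD_eq_getElem norm [] (by omega), List.flatten_cons, pv_flatten_drop,
            pv_baseN_succ norm elN heln]
        have hdd : norm.flatten.drop (pvBaseN norm elN + ecN)
            = (norm.flatten.drop (pvBaseN norm elN)).drop ecN := List.drop_drop.symm
        rw [hdd, hdecomp2, List.drop_append_of_le_length ?hle]
        case hle =>
          unfold pvClen at hclen_el
          have := pv_rstrip_length_le (norm.getD elN [])
          omega
      | cons r' rest' =>
        have hne : (r' :: rest') ≠ ([] : List (Int × Int × Int × Int × String)) := by simp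
        have hHn : H < n := (hRest hne).1
        have hHlt : H < old.length := by omega
        have hCle2 : C ≤ (norm.getD H []).length := by
          have h2 := (hRest hne).2
          unfold pvClen at h2
          have := pv_rstrip_length_le (norm.getD H [])
          omega
        have hlenp : ((norm.getD H []).take C).length = C := by
          rw [List.length_take]; omega
        -- the head of the remaining splice
        have hTail : pvTail norm (pvE norm r) (r' :: rest')
            = (norm.flatten.take (pvBaseN norm H + C)).drop (pvE norm r)
              ++ r'.2.2.2.2.toList ++ pvTail norm (pvE norm r') rest' := by
          show (norm.flatten.take (pvS norm r')).drop (pvE norm r) ++ _ ++ _ = _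
          rfl
        rw [hTail, pv_seg norm H C hHn hCle2]
        have hOflat' : R' ++ (old.drop (H + 1)).flatten
            = r'.2.2.2.2.toList ++ pvTail norm (pvE norm r') rest' := hOflat
        by_cases hcase : elN = H
        · -- the span ends on the first remaining span's start line
          have hecC : ecN ≤ C := hEcC hcase
          rw [hcase, hOldH]
          rw [List.drop_append_of_le_length (by rw [hlenp]; omega)]
          rw [List.append_assoc, hOflat']
          rw [hEval, hcase]
          rw [show pvBaseN norm H + ecN = (norm.take H).flatten.length + ecN by rw [hflt]]
          rw [List.drop_length_add_append]
          simp [List.append_assoc]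
        · -- the span ends strictly before it
          have helH : elN < H := by omega
          have hOldel : old.getD elN [] = norm.getD elN [] := hOldLt elN helH
          have hecle : ecN ≤ (norm.getD elN []).length := by
            unfold pvClen at hclen_el
            have := pv_rstrip_length_le (norm.getD elN [])
            omega
          -- split the untouched region between the two spans
          have hmid : old.drop (elN + 1)
              = (norm.drop (elN + 1)).take (H - (elN + 1)) ++ old.drop H := by
            apply List.ext_getElem?
            intro k
            rw [List.getElem?_drop]
            by_cases hk : k < H - (elN + 1)
            · rw [List.getElem?_append_left (by simp; omega), List.getElem?_take, if_pos hk,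
                List.getElem?_drop]
              exact hOpt (elN + 1 + k) (by omega)
            · rw [List.getElem?_append_right (by simp; omega)]
              rw [List.getElem?_drop]
              congr 1
              have hlmid : ((norm.drop (elN + 1)).take (H - (elN + 1))).length = H - (elN + 1) := by
                rw [List.length_take, List.length_drop]
                omega
              rw [hlmid]
              omega
          have hdropH2 : old.drop H = (old.getD H []) :: old.drop (H + 1) := by
            rw [List.drop_eq_getElem_cons hHlt, List.getD_eq_getElem _ _ (by omega)]
          have h1 : norm.take (elN + 1) = norm.take elN ++ [norm.getD elN []] := by
            rw [List.take_add_one, List.getElem?_eq_getElem (show elN < norm.length by omega)]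
            rw [List.getD_eq_getElem norm [] (show elN < norm.length by omega)]
            rfl
          have hHsum : elN + 1 + (H - (elN + 1)) = H := by omega
          have htakeH : (norm.take H).flatten
              = (norm.take elN).flatten
                ++ (norm.getD elN [] ++ ((norm.drop (elN + 1)).take (H - (elN + 1))).flatten) := by
            calc (norm.take H).flatten
                = (norm.take (elN + 1 + (H - (elN + 1)))).flatten := by rw [hHsum]
              _ = (norm.take (elN + 1) ++ (norm.drop (elN + 1)).take (H - (elN + 1))).flatten := by
                  rw [List.take_add]
              _ = _ := by rw [h1]; simp [List.flatten_append]
          have hseg2 : ((norm.take H).flatten ++ (norm.getD H []).take C).drop (pvBaseN norm elN + ecN)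
              = (norm.getD elN []).drop ecN
                ++ (((norm.drop (elN + 1)).take (H - (elN + 1))).flatten
                    ++ (norm.getD H []).take C) := by
            rw [htakeH]
            rw [show (norm.take elN).flatten
                  ++ (norm.getD elN [] ++ ((norm.drop (elN + 1)).take (H - (elN + 1))).flatten)
                  ++ (norm.getD H []).take C
                = (norm.take elN).flatten
                  ++ (norm.getD elN []
                      ++ (((norm.drop (elN + 1)).take (H - (elN + 1))).flatten
                          ++ (norm.getD H []).take C)) by simp [List.append_assoc]]
            rw [show pvBaseN norm elN + ecN = (norm.take elN).flatten.length + ecN by rw [hflt]]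
            rw [List.drop_length_add_append, List.drop_append_of_le_length hecle]
          rw [hmid, hdropH2, hOldH, hOldel]
          rw [List.flatten_append, List.flatten_cons]
          rw [hEval, hseg2]
          simp only [List.append_assoc]
          rw [hOflat']

-- assembling the invariant: A's final document is the cursor splice from offset 0
theorem pv_assemble (norm : List (List Char)) (rs : List (Int × Int × Int × Int × String))
    (hgood : ∀ r ∈ rs, pvGoodN norm r) (hinv : pvInv norm rs) :
    (pvAfter norm rs).flatten = pvTail norm 0 rs := by
  obtain ⟨hlen, hpt, R, hline, hflat⟩ := hinv
  cases rs with
  | nil =>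
    show (pvAfter norm []).flatten = norm.flatten.drop 0
    have : pvAfter norm [] = norm := rfl
    rw [this, List.drop_zero]
  | cons r rest =>
    obtain ⟨g1, g2, g3, g4, g5, g6, g7, g8⟩ := hgood r (List.mem_cons_self ..)
    set L := pvAfter norm (r :: rest) with hL
    have hsln : r.1.toNat < norm.length := by omega
    have hLlen : r.1.toNat < L.length := by rw [hlen]; omega
    have hdecomp : L = L.take r.1.toNat ++ L[r.1.toNat]'hLlen :: L.drop (r.1.toNat + 1) := by
      conv_lhs => rw [← List.take_append_drop r.1.toNat L]
      rw [List.drop_eq_getElem_cons hLlen]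
    have htake : L.take r.1.toNat = norm.take r.1.toNat := by
      apply List.ext_getElem?
      intro k
      rw [List.getElem?_take, List.getElem?_take]
      by_cases hk : k < r.1.toNat
      · rw [if_pos hk, if_pos hk]
        exact hpt k hk
      · rw [if_neg hk, if_neg hk]
    have hgetline : L[r.1.toNat]'hLlen
        = (norm.getD r.1.toNat []).take r.2.1.toNat ++ R := by
      have h := hline
      show L[r.1.toNat]'hLlen = _
      rw [show (L[pvHeadL norm (r :: rest)]?).getD [] = L[r.1.toNat]'hLlen from by
        rw [show pvHeadL norm (r :: rest) = r.1.toNat from rfl,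
          List.getElem?_eq_getElem hLlen]; rfl] at h
      exact h
    have hsclen : r.2.1.toNat ≤ (norm.getD r.1.toNat []).length := by
      unfold pvClen at g5
      have := pv_rstrip_length_le (norm.getD r.1.toNat [])
      omega
    have hflt : (norm.take r.1.toNat).flatten.length = pvBaseN norm r.1.toNat := by
      simp [pvBaseN, List.length_flatten, List.map_take]
    calc L.flatten
        = (L.take r.1.toNat).flatten ++ (L[r.1.toNat]'hLlen ++ (L.drop (r.1.toNat + 1)).flatten) := by
          conv_lhs => rw [hdecomp]
          rw [List.flatten_append, List.flatten_cons]
      _ = (norm.take r.1.toNat).flatten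
            ++ ((norm.getD r.1.toNat []).take r.2.1.toNat
                ++ (R ++ (L.drop (r.1.toNat + 1)).flatten)) := by
          rw [htake, hgetline, List.append_assoc]
      _ = (norm.take r.1.toNat).flatten
            ++ ((norm.getD r.1.toNat []).take r.2.1.toNat
                ++ (r.2.2.2.2.toList ++ pvTail norm (pvE norm r) rest)) := by
          rw [show R ++ (L.drop (r.1.toNat + 1)).flatten = pvTailPart norm (r :: rest) from hflat]
          rfl
      _ = norm.flatten.take (pvS norm r) ++ (r.2.2.2.2.toList ++ pvTail norm (pvE norm r) rest) := by
          rw [← List.append_assoc]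
          congr 1
          rw [show pvS norm r = pvBaseN norm r.1.toNat + r.2.1.toNat from rfl,
            pv_seg norm r.1.toNat r.2.1.toNat hsln hsclen]
      _ = pvTail norm 0 (r :: rest) := by
          conv_rhs => rw [pvTail]
          rw [List.drop_zero, List.append_assoc]

-- ---- base list of B ----
def pvBases (l : List (List Char)) : List Int :=
  (List.range (l.length + 1)).map (fun j => (pvBaseN l j : Int))

theorem pv_bases_step (pre : List (List Char)) (x : List Char) :
    pvBases pre ++ [PySem.List.pyGetD (pvBases pre) (-1) 0 + (x.length : Int)]
      = pvBases (pre ++ [x]) := by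
  have hne : pvBases pre ≠ [] := by
    apply List.ne_nil_of_length_pos
    simp [pvBases]
  rw [PySem.List.pyGetD_neg_one _ _ hne]
  have hlast : (pvBases pre).getLast hne = (pvBaseN pre pre.length : Int) := by
    rw [List.getLast_eq_getElem]
    simp [pvBases]
  have htotal : ∀ j : Nat, j ≤ pre.length → pvBaseN (pre ++ [x]) j = pvBaseN pre j := by
    intro j hj
    unfold pvBaseN
    rw [List.map_append, List.take_append_of_le_length (by simpa using hj)]
  have hnew : pvBaseN (pre ++ [x]) (pre.length + 1) = pvBaseN pre pre.length + x.length := by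
    unfold pvBaseN
    rw [List.map_append]
    rw [List.take_of_length_le (by simp), List.sum_append,
      List.take_of_length_le (by simp)]
    simp
  rw [hlast]
  have hx : pvBases (pre ++ [x])
      = pvBases pre ++ [((pvBaseN pre pre.length + x.length : Nat) : Int)] := by
    unfold pvBases
    rw [show (pre ++ [x]).length = pre.length + 1 by simp, List.range_succ, List.map_append]
    congr 1
    · apply List.map_congr_left
      intro j hj
      rw [htotal j (Nat.lt_succ_iff.mp (List.mem_range.mp hj))]
    · simp [hnew]
  rw [hx]
  push_cast
  rfl

theorem pv_fold_base (norm : List (List Char)) :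
    norm.foldl (fun b ln => b ++ [PySem.List.pyGetD b (-1) 0 + (ln.length : Int)]) [(0 : Int)]
      = pvBases norm := by
  suffices h : ∀ (xs pre : List (List Char)),
      xs.foldl (fun b ln => b ++ [PySem.List.pyGetD b (-1) 0 + (ln.length : Int)]) (pvBases pre)
        = pvBases (pre ++ xs) by
    have h0 : pvBases [] = [(0 : Int)] := by simp [pvBases, pvBaseN]
    simpa [h0] using h norm []
  intro xs
  induction xs with
  | nil => intro pre; simp
  | cons x t ih =>
    intro pre
    rw [List.foldl_cons, pv_bases_step pre x, ih (pre ++ [x])]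
    simp

theorem pv_bases_getD (norm : List (List Char)) (j : Nat) (hj : j ≤ norm.length) :
    PySem.List.pyGetD (pvBases norm) (j : Int) 0 = (pvBaseN norm j : Int) := by
  rw [PySem.List.pyGetD_natCast]
  unfold pvBases
  rw [PySem.List.getD_map_range _ _ _ _ (by omega)]

-- ---- B's cursor fold computes the splice ----
theorem pv_join_nil (ls : List (List Char)) : PySem.Chars.join [] ls = ls.flatten := by
  show ([] : List Char).intercalate ls = ls.flatten
  unfold List.intercalate
  induction ls with
  | nil => rfl
  | cons x t ih =>
    cases t with
    | nil => simp
    | cons y u => simpa [List.intersperse_cons₂] using ih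

theorem pv_B_fold (norm : List (List Char)) (rs : List (Int × Int × Int × Int × String))
    (hgood : ∀ r ∈ rs, 0 ≤ r.1 ∧ r.1 < (norm.length : Int) ∧ 0 ≤ r.2.1 ∧
      0 ≤ r.2.2.1 ∧ r.2.2.1 < (norm.length : Int) ∧ 0 ≤ r.2.2.2.1)
    (acc : List (List Char)) (c : Int) (hc : 0 ≤ c) :
    (rs.foldl
        (fun (st : List (List Char) × Int) r =>
          (st.1 ++ [PySem.List.slice norm.flatten (some st.2)
                      (some (PySem.List.pyGetD (pvBases norm) r.1 0 + r.2.1))]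
                ++ [r.2.2.2.2.toList],
           PySem.List.pyGetD (pvBases norm) r.2.2.1 0 + r.2.2.2.1))
        (acc, c)).1.flatten
      ++ PySem.List.slice norm.flatten
          (some (rs.foldl
            (fun (st : List (List Char) × Int) r =>
              (st.1 ++ [PySem.List.slice norm.flatten (some st.2)
                          (some (PySem.List.pyGetD (pvBases norm) r.1 0 + r.2.1))]
                    ++ [r.2.2.2.2.toList],
               PySem.List.pyGetD (pvBases norm) r.2.2.1 0 + r.2.2.2.1))
            (acc, c)).2) none
      = acc.flatten ++ pvTail norm c.toNat rs := by
  induction rs generalizing acc c with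
  | nil =>
    simp only [List.foldl_nil]
    rw [PySem.List.slice_from _ hc]
    rfl
  | cons r rest ih =>
    obtain ⟨h1, h2, h3, h4, h5, h6⟩ := hgood r (List.mem_cons_self ..)
    have hS : PySem.List.pyGetD (pvBases norm) r.1 0 + r.2.1 = ((pvS norm r : Nat) : Int) := by
      rw [show r.1 = ((r.1.toNat : Nat) : Int) by omega,
        pv_bases_getD norm r.1.toNat (by omega)]
      unfold pvS; push_cast; omega
    have hE : PySem.List.pyGetD (pvBases norm) r.2.2.1 0 + r.2.2.2.1
        = ((pvE norm r : Nat) : Int) := by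
      rw [show r.2.2.1 = ((r.2.2.1.toNat : Nat) : Int) by omega,
        pv_bases_getD norm r.2.2.1.toNat (by omega)]
      unfold pvE; push_cast; omega
    simp only [List.foldl_cons, hS, hE]
    rw [ih (fun x hx => hgood x (List.mem_cons_of_mem _ hx)) _ _ (by positivity)]
    simp only [List.flatten_append, List.flatten_cons, List.flatten_nil, List.append_nil,
      Int.toNat_natCast, pvTail]
    rw [PySem.List.slice_toNat _ hc (by positivity), Int.toNat_natCast, List.drop_take]
    simp [List.append_assoc]

-- ---- order facts about the sorted replacement list ----
theorem pv_sorted2_pairwise (xs : List (Int × Int × Int × Int × String)) :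
    (PySem.List.sorted2 xs (fun x => x.1) (fun x => x.2.1) true).Pairwise
      (fun a b => pvStartKey b ≤ pvStartKey a) := by
  have hfun : (fun a b : Int × Int × Int × Int × String =>
      decide (b.1 < a.1) || (!decide (a.1 < b.1) && decide (b.2.1 < a.2.1)))
      = fun a b => decide (pvStartKey b < pvStartKey a) := by
    funext a b
    by_cases h1 : b.1 < a.1 <;> by_cases h2 : a.1 < b.1 <;> by_cases h3 : b.2.1 < a.2.1 <;>
      simp [pvStartKey, Prod.Lex.lt_iff, h1, h2, h3] <;> omega
  have heq : PySem.List.sorted2 xs (fun x => x.1) (fun x => x.2.1) true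
      = xs.foldl (fun acc x => PySem.List.insertBy
          (fun a b => decide (pvStartKey b < pvStartKey a)) x acc) [] := by
    rw [← hfun]; rfl
  rw [heq]
  have gen : ∀ (l acc : List (Int × Int × Int × Int × String)),
      acc.Pairwise (fun a b => pvStartKey b ≤ pvStartKey a) →
      (l.foldl (fun acc x => PySem.List.insertBy
          (fun a b => decide (pvStartKey b < pvStartKey a)) x acc) acc).Pairwise
        (fun a b => pvStartKey b ≤ pvStartKey a) := by
    intro l
    induction l with
    | nil => exact fun acc h => h
    | cons x t ih =>
      intro acc h
      exact ih _ (PySem.List.insertBy_pairwise_ge pvStartKey x acc h)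
  exact gen xs [] List.Pairwise.nil

-- ---- Pre_'s splitlines view vs the ports' keepends splitlines ----
-- the break test of PySem.Chars.splitlines
def pvIsB (c : Char) : Bool :=
  decide (c.toNat = 10) || decide (c.toNat = 13) || decide (c.toNat = 11) ||
  decide (c.toNat = 12) || decide (c.toNat = 28) || decide (c.toNat = 29) ||
  decide (c.toNat = 30) || decide (c.toNat = 133) || decide (c.toNat = 8232) ||
  decide (c.toNat = 8233)

theorem pv_dom_break (c : Char) (hd : pvDomChar c = true) (h1 : c ≠ '\n') (h2 : c ≠ '\r') :
    pvIsB c = false := by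
  have h10 : c.toNat ≠ 10 := fun h => h1 (Char.ext (UInt32.toNat_inj.mp h))
  have h13 : c.toNat ≠ 13 := fun h => h2 (Char.ext (UInt32.toNat_inj.mp h))
  simp only [pvDomChar, Bool.or_eq_true, Bool.and_eq_true, decide_eq_true_eq, beq_iff_eq] at hd
  simp only [pvIsB, Bool.or_eq_false_iff, decide_eq_false_iff_not]
  omega

theorem pv_rstrip_norm (l : List Char) : pvRstripNL (pvNorm l) = pvRstripNL l := by
  unfold pvNorm
  by_cases h : pvEndsNL l <;> simp [h, pv_rstrip_snoc_nl]

theorem pv_go_sync (cur' cs : List Char) :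
    (∀ c ∈ cs, pvDomChar c = true) → pvNoNL cur' → ∀ acc,
    PySem.Chars.splitlines.go pvIsB cs cur'.reverse acc
      = acc.reverse ++ (pvSplitlinesKeep cur' cs).map pvRstripNL := by
  fun_induction pvSplitlinesKeep cur' cs with
  | case1 =>
    intro _ _ acc
    rw [PySem.Chars.splitlines.go.eq_1]
    simp
  | case2 cur h =>
    intro _ hcur acc
    rw [PySem.Chars.splitlines.go.eq_1]
    simp [List.isEmpty_iff, h, pv_rstrip_self cur hcur]
  | case3 cur rest ih =>
    intro hcs hcur acc
    rw [PySem.Chars.splitlines.go.eq_3 _ _ _ _ _ (by intro r1 hc _; exact absurd hc (by decide)),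
      if_pos (by decide), List.reverse_reverse,
      show ([] : List Char) = ([] : List Char).reverse from rfl,
      ih (fun c hc => hcs c (List.mem_cons_of_mem _ hc)) (by intro c hc; simp at hc)
        (cur :: acc)]
    simp [pv_rstrip_append cur ['\n'] hcur, show pvRstripNL ['\n'] = [] from by decide]
  | case4 cur rest ih =>
    intro hcs hcur acc
    rw [PySem.Chars.splitlines.go.eq_2, List.reverse_reverse,
      show ([] : List Char) = ([] : List Char).reverse from rfl,
      ih (fun c hc => hcs c (by simp; tauto)) (by intro c hc; simp at hc) (cur :: acc)]
    simp [pv_rstrip_append cur ['\r', '\n'] hcur, show pvRstripNL ['\r', '\n'] = [] from by decide]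
  | case5 cur rest h ih =>
    intro hcs hcur acc
    rw [PySem.Chars.splitlines.go.eq_3 _ _ _ _ _ (by intro r1 _ hr; exact h r1 hr),
      if_pos (by decide), List.reverse_reverse,
      show ([] : List Char) = ([] : List Char).reverse from rfl,
      ih (fun c hc => hcs c (List.mem_cons_of_mem _ hc)) (by intro c hc; simp at hc)
        (cur :: acc)]
    simp [pv_rstrip_append cur ['\r'] hcur, show pvRstripNL ['\r'] = [] from by decide]
  | case6 cur c rest h1 h2 h3 ih =>
    intro hcs hcur acc
    have hc1 : c ≠ '\n' := h1
    have hc2 : c ≠ '\r' := h3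
    rw [PySem.Chars.splitlines.go.eq_3 _ _ _ _ _ (by intro r1 hc _; exact hc2 hc),
      if_neg (by rw [pv_dom_break c (hcs c (List.mem_cons_self ..)) hc1 hc2]; simp),
      show c :: cur.reverse = (cur ++ [c]).reverse by simp,
      ih (fun d hd => hcs d (List.mem_cons_of_mem _ hd)) ?_ acc]
    intro d hd
    rcases (by simpa using hd : d ∈ cur ∨ d = c) with h' | h'
    · exact hcur d h'
    · subst h'
      simp [hc1, hc2]

theorem pv_splitlines_bridge (cs : List Char) (hcs : ∀ c ∈ cs, pvDomChar c = true) :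
    PySem.Chars.splitlines cs = (pvSplitlinesKeep [] cs).map pvRstripNL := by
  have h := pv_go_sync [] cs hcs (by intro c hc; simp at hc) []
  simpa using h

-- ===== VERDICT (by name: the statement is the Claim_ definition above) =====
theorem replace_sql_in_source_spec : Claim_equal_replace_sql_in_source := by
  intro source_code sql_replacements hDom hPre
  unfold Spec_replace_sql_in_source replace_sql_in_source replace_sql_in_source_alt
  by_cases hnil : pvSplitlinesKeep [] source_code.toList = []
  · simp [hnil]
  · simp only [if_neg hnil]
    have hsrcne : source_code.toList ≠ [] := fun h => hnil (by rw [h]; rfl)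
    rcases hPre with h | ⟨hgoodAll, hpairAll⟩
    · exact absurd h hsrcne
    set raw := pvSplitlinesKeep [] source_code.toList with hraw
    set norm := raw.map pvNorm with hnorm
    have hchars : ∀ c ∈ source_code.toList, pvDomChar c = true := by
      unfold Dom_replace_sql_in_source at hDom
      simp only [Bool.and_eq_true] at hDom
      have hds : pvDomStr source_code = true := hDom.1
      unfold pvDomStr at hds
      exact fun c hc => List.all_eq_true.mp hds c hc
    have hbridge : pvContentLines source_code = raw.map pvRstripNL :=
      pv_splitlines_bridge _ hchars
    have hlen_eq : (pvContentLines source_code).length = norm.length := by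
      rw [hbridge, hnorm]
      simp
    have hok : ∀ l ∈ norm, pvNoNL (pvRstripNL l) := by
      intro l hl
      obtain ⟨x, hx, rfl⟩ := List.mem_map.mp hl
      exact pv_norm_ok x (pv_slk_lines_ok [] source_code.toList (by intro c hc; simp at hc) x hx)
    set desc := PySem.List.sorted2 sql_replacements (fun x => x.1) (fun x => x.2.1) true
      with hdesc
    set asc := desc.reverse with hasc
    have hpermasc : asc.Perm sql_replacements :=
      (List.reverse_perm desc).trans
        (PySem.List.sorted2_perm sql_replacements (fun x => x.1) (fun x => x.2.1) true)
    have hline_eq : ∀ j : Nat, j < norm.length →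
        ((pvContentLines source_code).getD j []).length = pvClen norm j := by
      intro j hj
      have hjr : j < raw.length := by
        rw [hnorm] at hj
        simpa using hj
      rw [hbridge, List.getD_eq_getElem _ _ (by simpa using hjr), List.getElem_map]
      unfold pvClen
      rw [List.getD_eq_getElem _ _ hj]
      have hgm : norm[j]'hj = pvNorm (raw[j]'hjr) := by
        simp [hnorm]
      rw [hgm, pv_rstrip_norm]
    have hgood : ∀ r ∈ asc, pvGoodN norm r := by
      intro r hr
      obtain ⟨g1, g2, g3, g4, g5, g6, g7, g8⟩ := hgoodAll r (hpermasc.mem_iff.mp hr)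
      rw [hlen_eq] at g3
      refine ⟨g1, g2, g3, g4, ?_, g6, ?_, g8⟩
      · rw [← hline_eq r.1.toNat (by omega)]
        exact g5
      · rw [← hline_eq r.2.2.1.toNat (by omega)]
        exact g7
    have hpairassym : asc.Pairwise (fun a b =>
        (pvEndKey a ≤ pvStartKey b ∨ pvEndKey b ≤ pvStartKey a) ∧ pvStartKey a ≠ pvStartKey b) := by
      refine (List.Perm.pairwise_iff ?_ hpermasc).mpr hpairAll
      intro x y hxy
      exact ⟨hxy.1.symm, hxy.2.symm⟩
    have hascle : asc.Pairwise (fun a b => pvStartKey a ≤ pvStartKey b) :=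
      List.pairwise_reverse.mpr (pv_sorted2_pairwise sql_replacements)
    have hStartEnd : ∀ r ∈ asc, pvStartKey r ≤ pvEndKey r := by
      intro r hr
      obtain ⟨g1, g2, g3, g4, g5, g6, g7, g8⟩ := hgood r hr
      rw [Prod.Lex.le_iff]
      simp only [pvStartKey, pvEndKey, ofLex_toLex]
      rcases eq_or_lt_of_le g2 with h | h
      · right; exact ⟨h, g8 h⟩
      · left; exact h
    have hpairOriented : asc.Pairwise (fun a b => pvEndKey a ≤ pvStartKey b) := by
      refine (hascle.and hpairassym).imp_of_mem ?_
      intro a b ha hb hcomb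
      obtain ⟨hle, hdisj, hne⟩ := hcomb
      rcases hdisj with h | h
      · exact h
      · exact absurd (le_antisymm hle (le_trans (hStartEnd b hb) h)) hne
    have hInv := pv_inv norm hok asc hgood hpairOriented
    have hA : (pvAfter norm asc).flatten = pvTail norm 0 asc := pv_assemble norm asc hgood hInv
    -- A's normalization pass builds the normalized lines
    have hnormfold : (PySem.List.enumerate raw 0).foldl
        (fun ls p => if pvEndsNL p.2 then ls else PySem.List.pySetD ls p.1 (p.2 ++ ['\n'])) raw
        = norm := by
      have := pv_norm_foldl raw []
      simpa using this
    -- A's replacement loop over the reverse-sorted list is the right-to-left fold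
    have hfoldr : desc.foldl pvStepA norm = pvAfter norm asc := by
      rw [show desc = asc.reverse by rw [hasc, List.reverse_reverse], List.foldl_reverse]
      rfl
    -- B's prefix-sum base list and flat text
    have hbase : norm.foldl
        (fun b ln => b ++ [PySem.List.pyGetD b (-1) 0 + (ln.length : Int)]) [(0 : Int)]
        = pvBases norm := pv_fold_base norm
    have htext : PySem.Chars.join [] norm = norm.flatten := pv_join_nil norm
    have hgoodB : ∀ r ∈ asc, 0 ≤ r.1 ∧ r.1 < (norm.length : Int) ∧ 0 ≤ r.2.1 ∧
        0 ≤ r.2.2.1 ∧ r.2.2.1 < (norm.length : Int) ∧ 0 ≤ r.2.2.2.1 := by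
      intro r hr
      obtain ⟨g1, g2, g3, g4, g5, g6, g7, g8⟩ := hgood r hr
      exact ⟨g1, by omega, g4, by omega, g3, g6⟩
    have hB := pv_B_fold norm asc hgoodB [] 0 le_rfl
    rw [hnormfold, hfoldr, pv_join_nil, hA, hbase, htext]
    rw [pv_join_nil]
    rw [List.flatten_append]
    congr 1
    simpa using hB.symm
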